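-- pv_equiv track=rewrite | github.com/medic/cht-ai-tools | skills/cht-form-builder/scripts/generate-xlsform.py | survey_columns
-- ===== SOURCE A (Python) =====
-- def survey_columns(languages: list[str]) -> list[str]:
--     """Build ordered column names for the survey sheet."""
--     cols = ["type", "name"]
--     for lang in languages:
--         cols.append(f"label::{lang}")
--     cols.extend(["required", "relevant", "appearance", "constraint"])
--     for lang in languages:
--         cols.append(f"constraint_message::{lang}")
--     cols.append("calculation")
--     cols.append("default")
--     for lang in languages:
--         cols.append(f"hint::{lang}")
--     return cols
-- ===== SOURCE B (Python) =====
-- # Data-driven: one ordered schema list, one pass; per-language entries are 1-tuples.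
-- _SCHEMA = [
--     "type", "name",
--     ("label",),
--     "required", "relevant", "appearance", "constraint",
--     ("constraint_message",),
--     "calculation", "default",
--     ("hint",),
-- ]
--
-- def survey_columns(languages: list[str]) -> list[str]:
--     """Build ordered column names for the survey sheet."""
--     cols = []
--     for entry in _SCHEMA:
--         if isinstance(entry, tuple):
--             cols.extend(f"{entry[0]}::{lang}" for lang in languages)
--         else:
--             cols.append(entry)
--     return cols
-- ===== Notes on version B (the rewrite author's own statement) =====
-- stated objective: idiomatic
-- what changed: Replaces the three hand-unrolled per-language loops interleaved with append/extend calls by a single data-driven pass over one ordered schema list whose entries are either literal column names or per-language prefix markers.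
import Mathlib
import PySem

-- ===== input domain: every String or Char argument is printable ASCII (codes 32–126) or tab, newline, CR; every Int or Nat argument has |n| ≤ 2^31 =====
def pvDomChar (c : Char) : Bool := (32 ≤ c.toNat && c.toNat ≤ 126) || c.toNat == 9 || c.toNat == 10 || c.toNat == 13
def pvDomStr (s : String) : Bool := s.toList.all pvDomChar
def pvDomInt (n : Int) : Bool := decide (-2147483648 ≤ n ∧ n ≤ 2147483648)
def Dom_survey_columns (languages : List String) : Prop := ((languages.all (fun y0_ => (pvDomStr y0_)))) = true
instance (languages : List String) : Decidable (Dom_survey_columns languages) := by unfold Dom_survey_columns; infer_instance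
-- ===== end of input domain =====

-- B rebuilds the survey columns in a single data-driven pass over one ordered schema list
-- (literal names vs per-language prefixes) instead of three hand-unrolled loops; objective: idiomatic, not faster.


-- ===== PORT A =====
def survey_columns (languages : List String) : List String :=
  let cols := ["type", "name"]
  let cols := languages.foldl (fun c lang => c ++ ["label::" ++ lang]) cols
  let cols := cols ++ ["required", "relevant", "appearance", "constraint"]
  let cols := languages.foldl (fun c lang => c ++ ["constraint_message::" ++ lang]) cols
  let cols := cols ++ ["calculation"]
  let cols := cols ++ ["default"]
  let cols := languages.foldl (fun c lang => c ++ ["hint::" ++ lang]) cols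
  cols

-- ===== PORT B =====
-- schema entry: Sum.inl = literal column name, Sum.inr = per-language prefix (Source B's 1-tuple)
def pvSchema : List (String ⊕ String) :=
  [.inl "type", .inl "name",
   .inr "label",
   .inl "required", .inl "relevant", .inl "appearance", .inl "constraint",
   .inr "constraint_message",
   .inl "calculation", .inl "default",
   .inr "hint"]

def survey_columns_alt (languages : List String) : List String :=
  pvSchema.foldl
    (fun cols entry =>
      match entry with
      | .inr p => cols ++ languages.map (fun lang => (p ++ "::") ++ lang)
      | .inl s => cols ++ [s])
    []

-- ===== PRECONDITION & SPEC =====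
def Spec_survey_columns (languages : List String) (out : List String) : Prop := out = survey_columns_alt languages
instance (languages : List String) (out : List String) : Decidable (Spec_survey_columns languages out) := by unfold Spec_survey_columns; infer_instance

-- ===== CLAIM (what is proved, stated in full; the proofs are below) =====
def Claim_equal_survey_columns : Prop := ∀ (languages : List String), Dom_survey_columns languages → Spec_survey_columns languages (survey_columns languages)

-- ===== LEMMAS AND PROOFS =====

-- ===== VERDICT (by name: the statement is the Claim_ definition above) =====
theorem pv_foldl_lang (p : String) (langs : List String) (acc : List String) :
    langs.foldl (fun c lang => c ++ [p ++ lang]) acc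
      = acc ++ langs.map (fun lang => p ++ lang) := by
  induction langs generalizing acc with
  | nil => simp
  | cons h t ih => simp [List.foldl, ih]

theorem survey_columns_spec : Claim_equal_survey_columns := by
  intro languages _
  unfold Spec_survey_columns survey_columns survey_columns_alt pvSchema
  simp only [pv_foldl_lang, List.foldl]
  simp
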